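/- GENERATED by farm/mkstatement.py from design/units.tsv (unit `compute_codewords.7`) and the assertions of Vorbis/Spec/Codebook/Codewords.lean — do not edit.
   THE STATEMENT of the proof unit `compute_codewords.7`: segment 7 of `compute_codewords` (25 instructions; entries 0x1082c5;
   exits 0x1082ee,ret; ranges 0x1082c5-0x1082e9 + 0x1082c2-0x1082c2 + 0x1083e4-0x1083e9 + 0x1083b3-0x1083dc)
   takes each of its entry assertions to one of its exit assertions (`Vorbis.Spec.compute_codewords.Seg7`), given the contracts of its callees.
   What the names mean: Vorbis/Spec/Basic.lean (the shared hypotheses), Vorbis/Spec/Codebook/Codewords.lean (the assertions). The theorem to prove: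
   `theorem compute_codewords_7_ok : Vorbis.Spec.compute_codewords_7.Statement`. -/
import Vorbis.Spec.Codebook.Codewords
namespace Vorbis.Spec.compute_codewords_7
open X86 X86.User Asan

/-- The statement of unit `compute_codewords.7`. -/
def Statement : Prop :=
  ∀ (Lay : Layout) (_hLay : Lay.hi = 0x1000000) (μ : Microarch) (_hμ : UserX.MicroOK μ) (u₀ : State)
    (_hcode : HasCodeNat Lay u₀ Vorbis.L.compute_codewords.entry Vorbis.Code.code_compute_codewords.nat Vorbis.L.compute_codewords.size)
    (_h_asan_load4_noabort : Asan.SmallCheck Lay μ Vorbis.WayInv (Vorbis.CodeOK u₀) [.rax, .rcx, .rdx] 4 Vorbis.L.__asan_load4_noabort.entry),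
    Vorbis.Spec.compute_codewords.Seg7 Lay μ u₀

end Vorbis.Spec.compute_codewords_7
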